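-- pv_equiv track=rewrite | github.com/Keren2004keren/Basic_Python_Final_Work | BASIC_PYTHON.py | name_pet
-- ===== SOURCE A (Python) =====
-- def name_pet(array, name):
--     all_names = set()
--     for pet in array:
--         all_names.update(pet["names"])
--     if name not in all_names:
--         for pet in array:
--             pet["names"].append(name)
--     return array
-- ===== SOURCE B (Python) =====
-- def name_pet(array, name):
--     # One recursive pass: build the list of pets with name appended AND the
--     # "name already present" flag simultaneously, then pick which to return.
--     # (Return value only: unlike A, this builds new dicts instead of mutating.)
--     def go(pets):
--         if not pets:
--             return [], False
--         names = pets[0]["names"]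
--         rest, found = go(pets[1:])
--         return [{**pets[0], "names": names + [name]}] + rest, (name in names) or found
--     appended, found = go(array)
--     return array if found else appended
-- ===== Notes on version B (the rewrite author's own statement) =====
-- stated objective: alternative
-- what changed: Replaces A's two staged loops (build a union set of all names, then mutate every pet) by one recursive pass that simultaneously constructs the appended candidate list and the presence flag, then selects between the original and the candidate; no set and no second traversal.
import Mathlib
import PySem

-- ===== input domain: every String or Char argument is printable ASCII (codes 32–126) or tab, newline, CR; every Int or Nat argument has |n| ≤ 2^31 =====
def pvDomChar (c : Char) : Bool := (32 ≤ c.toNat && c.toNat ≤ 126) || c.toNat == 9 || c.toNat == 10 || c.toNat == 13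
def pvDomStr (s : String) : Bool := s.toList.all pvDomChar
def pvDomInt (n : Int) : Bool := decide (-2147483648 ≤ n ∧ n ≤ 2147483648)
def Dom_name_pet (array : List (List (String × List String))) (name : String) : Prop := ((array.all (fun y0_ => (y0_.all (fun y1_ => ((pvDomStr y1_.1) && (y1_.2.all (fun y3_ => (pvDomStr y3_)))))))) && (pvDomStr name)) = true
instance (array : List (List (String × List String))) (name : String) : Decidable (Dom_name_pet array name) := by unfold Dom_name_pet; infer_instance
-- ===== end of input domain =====

-- B replaces A's two staged loops (set-building pass, then mutate-all pass) by one recursive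
-- pass that builds the appended candidate list and the presence flag together, then selects.
-- Return-value equivalence only: the Python A mutates the pets in place, B builds new dicts.


-- ===== PORT A =====
-- all_names = set(); for pet in array: all_names.update(pet["names"]); if name not in all_names: append to each pet
def name_pet (array : List (List (String × List String))) (name : String) : List (List (String × List String)) :=
  let all_names : PySem.Set String :=
    array.foldl (fun s pet => PySem.Set.update s ((PySem.Dict.mk pet).getD "names" [])) PySem.Set.empty
  if PySem.Set.contains all_names name then array
  else array.map (fun pet => ((PySem.Dict.mk pet).modify "names" [] (fun l => l ++ [name])).items)

-- ===== PORT B =====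
-- def go(pets): if not pets: return [], False
--   names = pets[0]["names"]; rest, found = go(pets[1:])
--   return [{**pets[0], "names": names + [name]}] + rest, (name in names) or found
def name_pet_go (name : String) : List (List (String × List String)) → (List (List (String × List String)) × Bool)
  | [] => ([], false)
  | pet :: pets =>
    let names := (PySem.Dict.mk pet).getD "names" []
    let r := name_pet_go name pets
    (((PySem.Dict.mk pet).modify "names" [] (fun _ => names ++ [name])).items :: r.1,
     names.contains name || r.2)

-- appended, found = go(array); return array if found else appended
def name_pet_alt (array : List (List (String × List String))) (name : String) : List (List (String × List String)) :=
  let r := name_pet_go name array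
  if r.2 then array else r.1

-- ===== PRECONDITION & SPEC =====
-- Pre_ excludes exactly the inputs where the Python raises KeyError: a pet without a "names" key.
def Pre_name_pet (array : List (List (String × List String))) (_name : String) : Prop :=
  (array.all (fun pet => (PySem.Dict.mk pet).contains "names")) = true
instance (array : List (List (String × List String))) (name : String) : Decidable (Pre_name_pet array name) := by unfold Pre_name_pet; infer_instance
def pvWitness_name_pet : (List (List (String × List String))) × String := ([[("names", ["rex"])]], "bo")

def Spec_name_pet (array : List (List (String × List String))) (name : String) (out : List (List (String × List String))) : Prop := out = name_pet_alt array name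
instance (array : List (List (String × List String))) (name : String) (out : List (List (String × List String))) : Decidable (Spec_name_pet array name out) := by unfold Spec_name_pet; infer_instance

-- ===== CLAIM (what is proved, stated in full; the proofs are below) =====
def Claim_equal_name_pet : Prop := ∀ (array : List (List (String × List String))) (name : String), Dom_name_pet array name → Pre_name_pet array name → Spec_name_pet array name (name_pet array name)

-- ===== LEMMAS AND PROOFS =====

-- A's union-set membership equals a per-pet scan.
theorem mem_foldl_update (array : List (List (String × List String))) (name : String)
    (s : PySem.Set String) :
    (PySem.Set.contains
      (array.foldl (fun s pet => PySem.Set.update s ((PySem.Dict.mk pet).getD "names" [])) s) name)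
    = (s.contains name || array.any (fun pet => ((PySem.Dict.mk pet).getD "names" []).contains name)) := by
  induction array generalizing s with
  | nil => simp
  | cons pet rest ih =>
    simp only [List.foldl_cons, List.any_cons, ih]
    have : (PySem.Set.update s ((PySem.Dict.mk pet).getD "names" [])).contains name
        = (s.contains name || ((PySem.Dict.mk pet).getD "names" []).contains name) := by
      simp [PySem.Set.contains, PySem.Set.mem_update, List.contains_eq_mem]
    rw [this, Bool.or_assoc]

-- B's single recursive pass computes (the appended list, the presence flag).
theorem name_pet_go_eq (name : String) (l : List (List (String × List String))) :
    name_pet_go name l =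
      (l.map (fun pet => ((PySem.Dict.mk pet).modify "names" [] (fun x => x ++ [name])).items),
       l.any (fun pet => ((PySem.Dict.mk pet).getD "names" []).contains name)) := by
  induction l with
  | nil => rfl
  | cons pet rest ih =>
    simp only [name_pet_go, ih, List.map_cons, List.any_cons]
    refine Prod.ext ?_ rfl
    simp [PySem.Dict.modify, PySem.Dict.getD]

-- ===== VERDICT (by name: the statement is the Claim_ definition above) =====
theorem name_pet_spec : Claim_equal_name_pet := by
  intro array name _ _
  show name_pet array name = name_pet_alt array name
  unfold name_pet name_pet_alt
  simp only [mem_foldl_update, name_pet_go_eq]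
  simp [PySem.Set.empty]
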